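-- pv_equiv track=rewrite | github.com/alsonjiang/NUS-homework | matrices.py | get_all_binary
-- ===== SOURCE A (Python) =====
-- def get_all_binary(n):
--     queue = [""]
--     for _ in range(n):
--         x = queue[0]
--         queue.remove(x)
--         y = x + '0'
--         queue.append(y)
--         z = x + '1'
--         queue.append(z)
--
--     return queue
-- ===== SOURCE B (Python) =====
-- def get_all_binary(n):
--     def path(k):
--         s = ""
--         while k > 1:
--             s = ("1" if k % 2 else "0") + s
--             k //= 2
--         return s
--     return [path(k) for k in range(n + 1, 2 * n + 2)]
-- ===== Notes on version B (the rewrite author's own statement) =====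
-- stated objective: faster
-- what changed: Replaces the iterative queue expansion (pop-front + append two children, n rounds) with a closed-form heap-index computation: after n expansions the queue is exactly the binary path strings of nodes n+1..2n+1, computed directly per index.
-- outside the precondition, e.g. on get_all_binary(-1): A returns [''], B returns []
import Mathlib
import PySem

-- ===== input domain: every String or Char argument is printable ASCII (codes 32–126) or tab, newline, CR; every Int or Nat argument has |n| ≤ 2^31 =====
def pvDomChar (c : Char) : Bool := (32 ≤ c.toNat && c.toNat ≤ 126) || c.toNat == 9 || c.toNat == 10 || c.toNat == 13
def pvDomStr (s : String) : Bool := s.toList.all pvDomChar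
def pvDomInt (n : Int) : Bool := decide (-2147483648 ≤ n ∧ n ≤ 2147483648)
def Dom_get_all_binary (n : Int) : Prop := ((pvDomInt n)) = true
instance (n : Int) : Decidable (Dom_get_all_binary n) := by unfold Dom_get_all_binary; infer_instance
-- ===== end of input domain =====

-- B replaces A's iterative queue expansion by a closed-form per-index computation
-- (node k of the binary heap labels itself with its root path); objective: faster.

-- ===== PORT A =====
-- the loop body: x = queue[0]; queue.remove(x); queue.append(x+'0'); queue.append(x+'1')
def pvALoop : List String → Nat → List String
  | queue, 0 => queue
  | queue, Nat.succ m =>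
    match PySem.List.pyGet? queue 0 with
    | none => queue          -- IndexError (unreachable: the queue is never empty)
    | some x =>
      let queue' := (PySem.List.remove? queue x).getD queue
      pvALoop (queue' ++ [x ++ "0"] ++ [x ++ "1"]) m

def get_all_binary (n : Int) : List String := pvALoop [""] n.toNat

-- ===== PORT B =====
-- the while-loop of path(k): prepend the low bit, halve, until k ≤ 1
def pvPathAux (k : Int) (s : String) : String :=
  if _h : 1 < k then
    pvPathAux (PySem.Int.floordiv k 2) ((if PySem.Int.mod k 2 = 0 then "0" else "1") ++ s)
  else s
termination_by k.toNat
decreasing_by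
  have h2 : PySem.Int.floordiv k 2 = k / 2 := PySem.Int.floordiv_eq_ediv_of_pos (by omega)
  rw [h2]; omega

def get_all_binary_alt (n : Int) : List String :=
  (PySem.List.pyRange (n + 1) (2 * n + 2) 1).map (fun k => pvPathAux k "")

-- ===== PRECONDITION & SPEC =====
-- Pre_ restricts to the natural domain of nonnegative expansion counts; for negative n
-- A's loop body never runs and A returns [''] while B's empty range naturally gives [].
def Pre_get_all_binary (n : Int) : Prop := 0 ≤ n
instance (n : Int) : Decidable (Pre_get_all_binary n) := by unfold Pre_get_all_binary; infer_instance
def pvWitness_get_all_binary : Int := 3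

def Spec_get_all_binary (n : Int) (out : List String) : Prop := out = get_all_binary_alt n
instance (n : Int) (out : List String) : Decidable (Spec_get_all_binary n out) := by unfold Spec_get_all_binary; infer_instance

-- ===== CLAIM (what is proved, stated in full; the proofs are below) =====
def Claim_equal_get_all_binary : Prop := ∀ (n : Int), Dom_get_all_binary n → Pre_get_all_binary n → Spec_get_all_binary n (get_all_binary n)

-- ===== LEMMAS AND PROOFS =====

-- path of node k, as B computes it
def pvPath (k : Int) : String := pvPathAux k ""

lemma pvPathAux_eq_path_append (k : Int) (s : String) : pvPathAux k s = pvPath k ++ s := by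
  have H : ∀ m : Nat, ∀ k : Int, k.toNat = m → ∀ s, pvPathAux k s = pvPathAux k "" ++ s := by
    intro m
    induction m using Nat.strong_induction_on with
    | _ m ih =>
      intro k hm s
      rw [pvPathAux.eq_def, pvPathAux.eq_def (s := "")]
      by_cases h : 1 < k
      · rw [dif_pos h, dif_pos h]
        have hfd : PySem.Int.floordiv k 2 = k / 2 :=
          PySem.Int.floordiv_eq_ediv_of_pos (by omega)
        have hlt : (k / 2).toNat < m := by
          have : k / 2 < k := by omega
          omega
        set b := (if PySem.Int.mod k 2 = 0 then ("0" : String) else "1") with hb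
        rw [hfd, ih _ hlt _ rfl (b ++ s), ih _ hlt _ rfl (b ++ "")]
        simp [String.append_assoc]
      · rw [dif_neg h, dif_neg h]
        simp
  exact H k.toNat k rfl s

lemma pvPath_one : pvPath 1 = "" := by
  rw [pvPath, pvPathAux.eq_def]
  norm_num

lemma pvPath_double (k : Int) (hk : 1 ≤ k) : pvPath (2 * k) = pvPath k ++ "0" := by
  have hfd : PySem.Int.floordiv (2 * k) 2 = k := by
    rw [PySem.Int.floordiv_eq_ediv_of_pos (by omega)]
    omega
  have hmod : PySem.Int.mod (2 * k) 2 = 0 := by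
    rw [PySem.Int.mod_eq_emod_of_pos (by omega)]
    omega
  rw [pvPath, pvPathAux.eq_def, dif_pos (show (1:Int) < 2 * k by omega), hmod, hfd,
    if_pos rfl, pvPathAux_eq_path_append]
  simp

lemma pvPath_double_succ (k : Int) (hk : 1 ≤ k) : pvPath (2 * k + 1) = pvPath k ++ "1" := by
  have hfd : PySem.Int.floordiv (2 * k + 1) 2 = k := by
    rw [PySem.Int.floordiv_eq_ediv_of_pos (by omega)]
    omega
  have hmod : PySem.Int.mod (2 * k + 1) 2 = 1 := by
    rw [PySem.Int.mod_eq_emod_of_pos (by omega)]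
    omega
  rw [pvPath, pvPathAux.eq_def, dif_pos (show (1:Int) < 2 * k + 1 by omega), hmod, hfd,
    if_neg (by norm_num), pvPathAux_eq_path_append]
  simp

lemma pvGet_cons_zero (x : String) (l : List String) :
    PySem.List.pyGet? (x :: l) 0 = some x := by
  simp [PySem.List.pyGet?, PySem.List.pyIdx?]

lemma pvRemove_cons_self (x : String) (l : List String) :
    PySem.List.remove? (x :: l) x = some l := by
  have h : List.idxOf? x (x :: l) = some 0 := by simp [List.idxOf?_cons]
  simp [PySem.List.remove?, h]

-- the queue after t rounds: paths of nodes t+1 .. 2t+1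
def pvQ (t : Nat) : List String :=
  (List.range' (t + 1) (t + 1)).map (fun k : Nat => pvPath (k : Int))

lemma pvALoop_Q (m t : Nat) : pvALoop (pvQ t) m = pvQ (t + m) := by
  induction m generalizing t with
  | zero => rfl
  | succ m ih =>
    have hQ : pvQ t = pvPath ((t + 1 : Nat) : Int) ::
        (List.range' (t + 2) t).map (fun k : Nat => pvPath (k : Int)) := by
      rw [pvQ, List.range'_succ, List.map_cons]
    rw [pvALoop, hQ, pvGet_cons_zero]
    dsimp only
    rw [pvRemove_cons_self]
    simp only [Option.getD_some]
    have h0 : pvPath ((t + 1 : Nat) : Int) ++ "0" = pvPath ((2 * t + 2 : Nat) : Int) := by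
      have harg : ((2 * t + 2 : Nat) : Int) = 2 * ((t + 1 : Nat) : Int) := by push_cast; ring
      rw [harg, pvPath_double _ (by exact_mod_cast Nat.le_add_left 1 t)]
    have h1 : pvPath ((t + 1 : Nat) : Int) ++ "1" = pvPath ((2 * t + 3 : Nat) : Int) := by
      have harg : ((2 * t + 3 : Nat) : Int) = 2 * ((t + 1 : Nat) : Int) + 1 := by push_cast; ring
      rw [harg, pvPath_double_succ _ (by exact_mod_cast Nat.le_add_left 1 t)]
    have hsplit : List.range' (t + 1 + 1) (t + 1 + 1) =
        List.range' (t + 2) t ++ [2 * t + 2, 2 * t + 3] := by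
      have h2 : List.range' (t + 2 + t) 2 = [2 * t + 2, 2 * t + 3] := by
        have e1 : t + 2 + t = 2 * t + 2 := by omega
        have e2 : t + 2 + t + 1 = 2 * t + 3 := by omega
        rw [List.range'_succ, List.range'_one, e2, e1]
      rw [← h2]
      have h := List.range'_append (s := t + 2) (m := t) (n := 2) (step := 1)
      simp only [Nat.one_mul] at h
      rw [h]
    have hrange : (List.range' (t + 2) t).map (fun k : Nat => pvPath (k : Int)) ++
        [pvPath ((t + 1 : Nat) : Int) ++ "0"] ++ [pvPath ((t + 1 : Nat) : Int) ++ "1"]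
        = pvQ (t + 1) := by
      rw [h0, h1, pvQ, hsplit, List.map_append]
      simp
    rw [hrange, ih]
    congr 1
    omega

lemma alt_eq_Q (n : Int) (hn : 0 ≤ n) : get_all_binary_alt n = pvQ n.toNat := by
  rw [get_all_binary_alt, pvQ, PySem.List.pyRange_one, List.range'_eq_map_range,
    List.map_map, List.map_map]
  have hcount : (2 * n + 2 - (n + 1)).toNat = n.toNat + 1 := by omega
  rw [hcount]
  apply List.map_congr_left
  intro k hk
  simp only [Function.comp]
  rw [pvPath]
  congr 1
  push_cast
  omega

-- ===== VERDICT (by name: the statement is the Claim_ definition above) =====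
theorem get_all_binary_spec : Claim_equal_get_all_binary := by
  intro n _ hpre
  show _ = _
  have h0 : pvQ 0 = [""] := by
    rw [pvQ]
    simp [pvPath_one]
  rw [get_all_binary, alt_eq_Q n hpre, ← h0, pvALoop_Q]
  simp
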